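-- pv_equiv track=rewrite | github.com/arvidskarrie/adventofcode | 2020 - python/day16/main.py | get_approved_tickets
-- ===== SOURCE A (Python) =====
-- def get_approved_tickets(accepted_dict, ticket_list):
--     accepted_tickets = []
--
--     for ticket in ticket_list:
--         approved_numbers = 0
--         for number in ticket:
--             number = int(number)
--
--             break_outer = False
--             for accepted_intervals in accepted_dict.values():
--                 for [minm, maxm] in accepted_intervals:
--                     if int(minm) <= number <= int(maxm):
--                         approved_numbers += 1
--                         break_outer = True
--                         break
--                 if break_outer:
--                     break
--
--         if approved_numbers == len(ticket):
--             accepted_tickets.append(ticket)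
--     return accepted_tickets
-- ===== SOURCE B (Python) =====
-- def _bisect_right(a, x):
--     lo, hi = 0, len(a)
--     while lo < hi:
--         mid = (lo + hi) // 2
--         if x < a[mid]:
--             hi = mid
--         else:
--             lo = mid + 1
--     return lo
--
--
-- def get_approved_tickets(accepted_dict, ticket_list):
--     # Preprocess once: flatten all intervals, sort by lower bound, merge
--     # overlapping ones into disjoint sorted intervals; each ticket number
--     # is then checked by one binary search instead of a scan of all fields.
--     flat = sorted(
--         ((int(minm), int(maxm))
--          for accepted_intervals in accepted_dict.values()
--          for [minm, maxm] in accepted_intervals),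
--         key=lambda p: p[0],
--     )
--     merged = []
--     cur = None
--     for lo, hi in flat:
--         if cur is None:
--             cur = (lo, hi)
--         elif lo <= cur[1]:
--             if hi > cur[1]:
--                 cur = (cur[0], hi)
--         else:
--             merged.append(cur)
--             cur = (lo, hi)
--     if cur is not None:
--         merged.append(cur)
--     starts = [lo for lo, _ in merged]
--
--     def approved(n):
--         i = _bisect_right(starts, n)
--         return i > 0 and n <= merged[i - 1][1]
--
--     return [t for t in ticket_list if all(approved(int(n)) for n in t)]
-- ===== Notes on version B (the rewrite author's own statement) =====
-- stated objective: faster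
-- what changed: Instead of scanning every field's interval list for every ticket number, B flattens all intervals once, sorts them, merges them into disjoint sorted intervals, and checks each ticket number with a single binary search.
-- outside the precondition, e.g. on get_approved_tickets({'a': [[1, 2], [5]]}, []): A returns [], B raises ValueError
import Mathlib
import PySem

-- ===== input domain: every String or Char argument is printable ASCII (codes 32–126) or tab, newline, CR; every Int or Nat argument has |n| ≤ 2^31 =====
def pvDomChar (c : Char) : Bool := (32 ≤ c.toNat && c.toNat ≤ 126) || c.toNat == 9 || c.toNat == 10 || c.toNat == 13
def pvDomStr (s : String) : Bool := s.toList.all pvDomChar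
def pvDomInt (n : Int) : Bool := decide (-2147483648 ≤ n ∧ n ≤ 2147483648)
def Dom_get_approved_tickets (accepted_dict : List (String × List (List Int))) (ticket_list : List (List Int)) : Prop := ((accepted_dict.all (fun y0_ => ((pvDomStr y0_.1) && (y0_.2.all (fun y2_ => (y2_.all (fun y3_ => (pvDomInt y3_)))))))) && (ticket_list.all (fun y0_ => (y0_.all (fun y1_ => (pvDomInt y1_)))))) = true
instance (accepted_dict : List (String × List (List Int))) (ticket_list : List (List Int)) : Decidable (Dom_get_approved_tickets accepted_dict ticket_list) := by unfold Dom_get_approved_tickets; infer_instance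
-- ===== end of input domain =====

-- B preprocesses the intervals once (flatten, sort, merge into disjoint sorted
-- intervals) and checks each ticket number with one binary search, instead of
-- A's per-number scan over every field's intervals with a counter and breaks.

-- ===== PORT A =====
-- inner loop 'for [minm, maxm] in accepted_intervals' with break on a match;
-- a malformed interval (length ≠ 2) makes Python raise ValueError — outside Pre_ — here it is skipped
def aRow (n : Int) : List (List Int) → Bool
  | [] => false
  | iv :: rest =>
    match iv with
    | [minm, maxm] => if minm ≤ n ∧ n ≤ maxm then true else aRow n rest
    | _ => aRow n rest

-- 'for accepted_intervals in accepted_dict.values()' with break_outer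
def aScan (n : Int) : List (List (List Int)) → Bool
  | [] => false
  | row :: rest => if aRow n row then true else aScan n rest

def get_approved_tickets (accepted_dict : List (String × List (List Int))) (ticket_list : List (List Int)) : List (List Int) :=
  ticket_list.foldl (fun accepted_tickets ticket =>
    let approved_numbers : Int :=
      ticket.foldl (fun c number => if aScan number (accepted_dict.map Prod.snd) then c + 1 else c) 0
    if approved_numbers = (ticket.length : Int) then accepted_tickets ++ [ticket] else accepted_tickets) []

-- ===== PORT B =====
-- the generator of Source B's sorted(...): all intervals as pairs; Python raises on a
-- malformed interval (length ≠ 2) — outside Pre_ — here it is skipped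
def bToPair (iv : List Int) : Option (Int × Int) :=
  match iv with
  | [minm, maxm] => some (minm, maxm)
  | _ => none

def bFlat (accepted_dict : List (String × List (List Int))) : List (Int × Int) :=
  (accepted_dict.map Prod.snd).flatMap (fun row => row.filterMap bToPair)

-- Source B's merge loop over the sorted pairs; state (l, h) is Source B's 'cur',
-- emitting an interval (cons) is Source B's 'merged.append(cur)'
def bMergeRec (l h : Int) : List (Int × Int) → List (Int × Int)
  | [] => [(l, h)]
  | (lo, hi) :: rest =>
    if lo ≤ h then bMergeRec l (if h < hi then hi else h) rest
    else (l, h) :: bMergeRec lo hi rest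

def bMerge : List (Int × Int) → List (Int × Int)
  | [] => []
  | (lo, hi) :: rest => bMergeRec lo hi rest

-- Source B's 'approved(n)': _bisect_right is CPython's bisect_right loop = PySem.List.bisectRight
def bApproved (merged : List (Int × Int)) (starts : List Int) (n : Int) : Bool :=
  let i := PySem.List.bisectRight starts n
  if 0 < i then
    match merged[i - 1]? with
    | some p => decide (n ≤ p.2)
    | none => false
  else false

def get_approved_tickets_alt (accepted_dict : List (String × List (List Int))) (ticket_list : List (List Int)) : List (List Int) :=
  let flat := PySem.List.sorted (bFlat accepted_dict) (fun p => p.1) false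
  let merged := bMerge flat
  let starts := merged.map Prod.fst
  ticket_list.filter (fun t => t.all (fun n => bApproved merged starts n))

-- ===== PRECONDITION & SPEC =====
-- Pre_ excludes inputs containing an interval that is not a [min, max] pair: Python's
-- unpacking raises ValueError there (A as soon as its scan reaches it, B always, since
-- B preprocesses every interval up front).
def Pre_get_approved_tickets (accepted_dict : List (String × List (List Int))) (ticket_list : List (List Int)) : Prop :=
  ∀ kv ∈ accepted_dict, ∀ iv ∈ kv.2, iv.length = 2
instance (accepted_dict : List (String × List (List Int))) (ticket_list : List (List Int)) : Decidable (Pre_get_approved_tickets accepted_dict ticket_list) := by unfold Pre_get_approved_tickets; infer_instance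
def pvWitness_get_approved_tickets : (List (String × List (List Int))) × List (List Int) :=
  ([("row", [[1, 5], [10, 12]]), ("seat", [[4, 8]])], [[3, 11], [9, 2]])

def Spec_get_approved_tickets (accepted_dict : List (String × List (List Int))) (ticket_list : List (List Int)) (out : List (List Int)) : Prop := out = get_approved_tickets_alt accepted_dict ticket_list
instance (accepted_dict : List (String × List (List Int))) (ticket_list : List (List Int)) (out : List (List Int)) : Decidable (Spec_get_approved_tickets accepted_dict ticket_list out) := by unfold Spec_get_approved_tickets; infer_instance

-- ===== CLAIM (what is proved, stated in full; the proofs are below) =====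
def Claim_equal_get_approved_tickets : Prop := ∀ (accepted_dict : List (String × List (List Int))) (ticket_list : List (List Int)), Dom_get_approved_tickets accepted_dict ticket_list → Pre_get_approved_tickets accepted_dict ticket_list → Spec_get_approved_tickets accepted_dict ticket_list (get_approved_tickets accepted_dict ticket_list)

-- ===== LEMMAS AND PROOFS =====

-- n lies in the closed interval p
def covers (n : Int) (p : Int × Int) : Prop := p.1 ≤ n ∧ n ≤ p.2

lemma aRow_iff (n : Int) (row : List (List Int)) (h2 : ∀ iv ∈ row, iv.length = 2) :
    aRow n row = true ↔ ∃ p ∈ row.filterMap bToPair, covers n p := by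
  induction row with
  | nil => simp [aRow]
  | cons iv rest ih =>
    have hlen : iv.length = 2 := h2 iv (by simp)
    match iv, hlen with
    | [a, b], _ =>
      have ih' := ih (fun iv h => h2 iv (by simp [h]))
      by_cases hc : a ≤ n ∧ n ≤ b
      · simp [aRow, bToPair, hc, covers]
      · simp [aRow, bToPair, hc, ih', covers]

lemma aScan_iff (n : Int) (rows : List (List (List Int))) (h2 : ∀ row ∈ rows, ∀ iv ∈ row, iv.length = 2) :
    aScan n rows = true ↔ ∃ p ∈ rows.flatMap (fun row => row.filterMap bToPair), covers n p := by
  induction rows with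
  | nil => simp [aScan]
  | cons row rest ih =>
    have hrow := aRow_iff n row (h2 row (by simp))
    have ih' := ih (fun r h => h2 r (by simp [h]))
    simp only [aScan, List.flatMap_cons, List.mem_append]
    by_cases hc : aRow n row = true
    · rw [if_pos hc]
      constructor
      · intro _
        obtain ⟨p, hp, hcov⟩ := hrow.mp hc
        exact ⟨p, Or.inl hp, hcov⟩
      · intro _; rfl
    · rw [if_neg hc, ih']
      constructor
      · rintro ⟨p, hp, hcov⟩; exact ⟨p, Or.inr hp, hcov⟩
      · rintro ⟨p, hp | hp, hcov⟩
        · exact absurd (hrow.mpr ⟨p, hp, hcov⟩) hc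
        · exact ⟨p, hp, hcov⟩

lemma mergeRec_cover (n : Int) : ∀ (rest : List (Int × Int)) (l h : Int),
    (∀ p ∈ rest, l ≤ p.1) → rest.Pairwise (fun p q => p.1 ≤ q.1) →
    ((∃ p ∈ bMergeRec l h rest, covers n p) ↔ covers n (l, h) ∨ ∃ p ∈ rest, covers n p) := by
  intro rest
  induction rest with
  | nil => intro l h _ _; simp [bMergeRec]
  | cons q rest ih =>
    intro l h hhead hpw
    obtain ⟨lo, hi⟩ := q
    have hllo : l ≤ lo := hhead (lo, hi) (by simp)
    have hrest : ∀ p ∈ rest, lo ≤ p.1 := by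
      intro p hp; exact (List.pairwise_cons.mp hpw).1 p hp
    have hrest' : ∀ p ∈ rest, l ≤ p.1 := fun p hp => le_trans hllo (hrest p hp)
    have hpw' : rest.Pairwise (fun p q => p.1 ≤ q.1) := (List.pairwise_cons.mp hpw).2
    by_cases hc : lo ≤ h
    · rw [show bMergeRec l h ((lo, hi) :: rest) = bMergeRec l (if h < hi then hi else h) rest from by
        simp [bMergeRec, hc]]
      rw [ih l (if h < hi then hi else h) hrest' hpw']
      have hiff : covers n (l, if h < hi then hi else h) ↔ covers n (l, h) ∨ covers n (lo, hi) := by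
        simp only [covers]
        constructor
        · rintro ⟨h1, h2⟩
          by_cases hn : n ≤ h
          · exact Or.inl ⟨h1, hn⟩
          · have hhi : n ≤ hi := by split_ifs at h2 <;> omega
            exact Or.inr ⟨by omega, hhi⟩
        · rintro (⟨h1, h2⟩ | ⟨h1, h2⟩)
          · exact ⟨h1, by split_ifs <;> omega⟩
          · exact ⟨by omega, by split_ifs <;> omega⟩
      rw [hiff]
      constructor
      · rintro (hx | hE)
        · rcases hx with hx | hx
          · exact Or.inl hx
          · exact Or.inr ⟨(lo, hi), by simp, hx⟩
        · obtain ⟨p, hp, hcov⟩ := hE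
          exact Or.inr ⟨p, by simp [hp], hcov⟩
      · rintro (hx | ⟨p, hp, hcov⟩)
        · exact Or.inl (Or.inl hx)
        · rcases List.mem_cons.mp hp with rfl | hp
          · exact Or.inl (Or.inr hcov)
          · exact Or.inr ⟨p, hp, hcov⟩
    · rw [show bMergeRec l h ((lo, hi) :: rest) = (l, h) :: bMergeRec lo hi rest from by
        simp [bMergeRec, hc]]
      have := ih lo hi hrest hpw'
      constructor
      · rintro ⟨p, hp, hcov⟩
        rcases List.mem_cons.mp hp with rfl | hp
        · exact Or.inl hcov
        · rcases this.mp ⟨p, hp, hcov⟩ with hx | ⟨p', hp', hcov'⟩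
          · exact Or.inr ⟨(lo, hi), by simp, hx⟩
          · exact Or.inr ⟨p', by simp [hp'], hcov'⟩
      · rintro (hx | ⟨p, hp, hcov⟩)
        · exact ⟨(l, h), by simp, hx⟩
        · rcases List.mem_cons.mp hp with rfl | hp
          · obtain ⟨p', hp', hcov'⟩ := this.mpr (Or.inl hcov)
            exact ⟨p', by simp [hp'], hcov'⟩
          · obtain ⟨p', hp', hcov'⟩ := this.mpr (Or.inr ⟨p, hp, hcov⟩)
            exact ⟨p', by simp [hp'], hcov'⟩

lemma mergeRec_inv : ∀ (rest : List (Int × Int)) (l h : Int),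
    (∀ p ∈ rest, l ≤ p.1) → rest.Pairwise (fun p q => p.1 ≤ q.1) →
    ∃ h' t, bMergeRec l h rest = (l, h') :: t ∧
      ((l, h') :: t).Pairwise (fun p q => p.1 ≤ q.1) ∧
      ((l, h') :: t).Pairwise (fun p q => p.2 < q.1) := by
  intro rest
  induction rest with
  | nil => intro l h _ _; exact ⟨h, [], rfl, by simp, by simp⟩
  | cons q rest ih =>
    intro l h hhead hpw
    obtain ⟨lo, hi⟩ := q
    have hllo : l ≤ lo := hhead (lo, hi) (by simp)
    have hrest : ∀ p ∈ rest, lo ≤ p.1 := fun p hp => (List.pairwise_cons.mp hpw).1 p hp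
    have hrest' : ∀ p ∈ rest, l ≤ p.1 := fun p hp => le_trans hllo (hrest p hp)
    have hpw' : rest.Pairwise (fun p q => p.1 ≤ q.1) := (List.pairwise_cons.mp hpw).2
    by_cases hc : lo ≤ h
    · rw [show bMergeRec l h ((lo, hi) :: rest) = bMergeRec l (if h < hi then hi else h) rest from by
        simp [bMergeRec, hc]]
      exact ih l (if h < hi then hi else h) hrest' hpw'
    · rw [show bMergeRec l h ((lo, hi) :: rest) = (l, h) :: bMergeRec lo hi rest from by
        simp [bMergeRec, hc]]
      obtain ⟨h', t, heq, hfst, hsep⟩ := ih lo hi hrest hpw'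
      refine ⟨h, (lo, h') :: t, by rw [heq], ?_, ?_⟩
      · refine List.pairwise_cons.mpr ⟨?_, hfst⟩
        intro p hp
        rcases List.mem_cons.mp hp with rfl | hp
        · exact hllo
        · exact le_trans hllo ((List.pairwise_cons.mp hfst).1 p hp)
      · refine List.pairwise_cons.mpr ⟨?_, hsep⟩
        intro p hp
        rcases List.mem_cons.mp hp with rfl | hp
        · omega
        · have := (List.pairwise_cons.mp hfst).1 p hp
          omega

lemma bApproved_iff (m : List (Int × Int)) (n : Int)
    (hs : (m.map Prod.fst).Pairwise (· ≤ ·))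
    (hsep : m.Pairwise (fun p q => p.2 < q.1)) :
    bApproved m (m.map Prod.fst) n = true ↔ ∃ p ∈ m, covers n p := by
  obtain ⟨hle, hlt_all, hgt_all⟩ := PySem.List.bisectRight_spec (m.map Prod.fst) n hs
  have hlen : (m.map Prod.fst).length = m.length := by simp
  simp only [bApproved]
  set i := PySem.List.bisectRight (m.map Prod.fst) n with hidef
  constructor
  · intro hb
    by_cases h0 : 0 < i
    · rw [if_pos h0] at hb
      have hidx : i - 1 < m.length := by omega
      rw [List.getElem?_eq_getElem hidx] at hb
      have hfst : m[i - 1].1 ≤ n := by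
        have := hlt_all (i - 1) (by omega) (by omega)
        simpa using this
      refine ⟨m[i - 1], List.getElem_mem hidx, hfst, ?_⟩
      simpa using hb
    · rw [if_neg h0] at hb
      exact absurd hb (by simp)
  · rintro ⟨p, hp, hc1, hc2⟩
    obtain ⟨j, hj, rfl⟩ := List.mem_iff_getElem.mp hp
    have hjlt : j < i := by
      by_contra hge
      have := hgt_all j (by omega) (by omega)
      rw [List.getElem_map] at this
      omega
    have h0 : 0 < i := by omega
    rw [if_pos h0]
    have hidx : i - 1 < m.length := by omega
    rw [List.getElem?_eq_getElem hidx]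
    simp only [decide_eq_true_eq]
    by_cases hji : j = i - 1
    · subst hji; exact hc2
    · have hjlt2 : j < i - 1 := by omega
      have hsepji := List.pairwise_iff_getElem.mp hsep j (i - 1) hj hidx hjlt2
      have hf : m[i - 1].1 ≤ n := by
        have := hlt_all (i - 1) (by omega) (by omega)
        simpa using this
      omega

-- the pointwise bridge: A's per-number scan equals B's binary-search check
lemma point_eq (accepted_dict : List (String × List (List Int)))
    (hpre : ∀ kv ∈ accepted_dict, ∀ iv ∈ kv.2, iv.length = 2) (n : Int) :
    aScan n (accepted_dict.map Prod.snd) =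
      bApproved (bMerge (PySem.List.sorted (bFlat accepted_dict) (fun p => p.1) false))
        ((bMerge (PySem.List.sorted (bFlat accepted_dict) (fun p => p.1) false)).map Prod.fst) n := by
  have h2 : ∀ row ∈ accepted_dict.map Prod.snd, ∀ iv ∈ row, iv.length = 2 := by
    intro row hr
    obtain ⟨kv, hkv, rfl⟩ := List.mem_map.mp hr
    exact hpre kv hkv
  rw [Bool.eq_iff_iff, aScan_iff n _ h2]
  cases hflat : PySem.List.sorted (bFlat accepted_dict) (fun p => p.1) false with
  | nil =>
    have hempty : bFlat accepted_dict = [] := by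
      rw [List.eq_nil_iff_forall_not_mem]
      intro p hp
      have := (PySem.List.mem_sorted (bFlat accepted_dict) (fun p => p.1) false p).mpr hp
      rw [hflat] at this
      simp at this
    rw [show (accepted_dict.map Prod.snd).flatMap (fun row => row.filterMap bToPair) = bFlat accepted_dict from rfl, hempty]
    simp [bMerge, bApproved, PySem.List.bisectRight, PySem.List.bisectRightLoop]
  | cons q rest =>
    have hpw : (q :: rest).Pairwise (fun a b : Int × Int => a.1 ≤ b.1) := by
      have := PySem.List.sorted_pairwise (bFlat accepted_dict) (fun p : Int × Int => p.1)
      rw [hflat] at this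
      exact this
    obtain ⟨lo, hi⟩ := q
    have hhead : ∀ p ∈ rest, lo ≤ p.1 := (List.pairwise_cons.mp hpw).1
    have hpw' := (List.pairwise_cons.mp hpw).2
    obtain ⟨h', t, heq, hfst, hsep⟩ := mergeRec_inv rest lo hi hhead hpw'
    rw [show bMerge ((lo, hi) :: rest) = bMergeRec lo hi rest from rfl]
    rw [bApproved_iff (bMergeRec lo hi rest) n
      (by rw [heq]; exact List.pairwise_map.mpr hfst)
      (by rw [heq]; exact hsep)]
    rw [mergeRec_cover n rest lo hi hhead hpw']
    have hmem : ∀ p : Int × Int, p ∈ bFlat accepted_dict ↔ p ∈ (lo, hi) :: rest := by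
      intro p
      rw [← hflat]
      exact (PySem.List.mem_sorted _ _ _ p).symm
    constructor
    · rintro ⟨p, hp, hcov⟩
      rcases List.mem_cons.mp ((hmem p).mp hp) with rfl | hp'
      · exact Or.inl hcov
      · exact Or.inr ⟨p, hp', hcov⟩
    · rintro (hcov | ⟨p, hp, hcov⟩)
      · exact ⟨(lo, hi), (hmem _).mpr (List.mem_cons_self), hcov⟩
      · exact ⟨p, (hmem _).mpr (List.mem_cons_of_mem _ hp), hcov⟩

-- ===== VERDICT (by name: the statement is the Claim_ definition above) =====
theorem get_approved_tickets_spec : Claim_equal_get_approved_tickets := by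
  intro accepted_dict ticket_list _ hpre
  unfold Spec_get_approved_tickets get_approved_tickets get_approved_tickets_alt
  have hcond : ∀ t : List Int,
      (List.foldl (fun c number => if aScan number (accepted_dict.map Prod.snd) then c + 1 else c) (0 : Int) t = (t.length : Int))
        ↔ t.all (fun nn => aScan nn (accepted_dict.map Prod.snd)) = true := by
    intro t
    rw [PySem.List.foldl_count_if (fun nn => aScan nn (accepted_dict.map Prod.snd)) t 0, zero_add]
    simp [Nat.cast_inj, List.countP_eq_length, List.all_eq_true]
  have hfun : (fun (accepted_tickets : List (List Int)) ticket =>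
        let approved_numbers : Int := ticket.foldl (fun c number => if aScan number (accepted_dict.map Prod.snd) then c + 1 else c) 0
        if approved_numbers = (ticket.length : Int) then accepted_tickets ++ [ticket] else accepted_tickets)
      = (fun acc t => if (fun t : List Int => t.all (fun nn => aScan nn (accepted_dict.map Prod.snd))) t = true then acc ++ [id t] else acc) := by
    funext acc t
    exact if_congr (hcond t) rfl rfl
  rw [hfun, PySem.List.foldl_append_if (fun t : List Int => t.all (fun nn => aScan nn (accepted_dict.map Prod.snd))) id ticket_list []]
  simp only [List.map_id, List.nil_append]
  apply List.filter_congr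
  intro t _
  rw [Bool.eq_iff_iff]
  simp only [List.all_eq_true]
  constructor
  · intro ha nn hnn
    rw [← point_eq accepted_dict hpre nn]
    exact ha nn hnn
  · intro hb nn hnn
    rw [point_eq accepted_dict hpre nn]
    exact hb nn hnn
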